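-- pv_equiv track=rewrite | github.com/DongKeun2/algorithm | Programmers/숫자 카드 나누기.py | solution
-- ===== SOURCE A (Python) =====
-- def gcd(n, m):
--     if n < m:
--         n, m = m, n
--
--     if n%m == 0:
--         return m
--     return gcd(m, n%m)
--
-- def sol(lst):
--     if len(lst) == 1:
--         return lst[0]
--
--     value = gcd(lst[0], lst[1])
--
--     if len(lst) > 2:
--         for num in lst[2:]:
--             value = gcd(num, value)
--
--     return value
--
-- def solution(arrayA, arrayB):
--     answer = 0
--     # 두 리스트의 최대공약수 구하기
--     a = sol(arrayA)
--     b = sol(arrayB)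
--
--     # 1번 조건 확인
--     for x in arrayB:
--         if not x % a:
--             break
--     else:
--         answer = max(answer, a)
--
--     # 2번 조건 확인
--     for y in arrayA:
--         if not y % b:
--             break
--     else:
--         answer = max(answer, b)
--
--
--     return answer
-- ===== SOURCE B (Python) =====
-- def gcd_iter(n, m):
--     if n < m:
--         n, m = m, n
--     while n % m:
--         n, m = m, n % m
--     return m
--
-- def solution(arrayA, arrayB):
--     answer = 0
--     for xs, ys in ((arrayA, arrayB), (arrayB, arrayA)):
--         d = xs[0]
--         for v in xs[1:]:
--             d = gcd_iter(v, d)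
--         if all(y % d for y in ys) and d > answer:
--             answer = d
--     return answer
-- ===== Notes on version B (the rewrite author's own statement) =====
-- stated objective: simpler
-- what changed: The recursive Euclidean gcd becomes an explicit iterative while-loop, the three-function pipeline (gcd/sol/solution) collapses into one symmetric loop over the two (source, target) directions with an inline gcd fold, and the for-else divisibility checks become all() tests.
import Mathlib
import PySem

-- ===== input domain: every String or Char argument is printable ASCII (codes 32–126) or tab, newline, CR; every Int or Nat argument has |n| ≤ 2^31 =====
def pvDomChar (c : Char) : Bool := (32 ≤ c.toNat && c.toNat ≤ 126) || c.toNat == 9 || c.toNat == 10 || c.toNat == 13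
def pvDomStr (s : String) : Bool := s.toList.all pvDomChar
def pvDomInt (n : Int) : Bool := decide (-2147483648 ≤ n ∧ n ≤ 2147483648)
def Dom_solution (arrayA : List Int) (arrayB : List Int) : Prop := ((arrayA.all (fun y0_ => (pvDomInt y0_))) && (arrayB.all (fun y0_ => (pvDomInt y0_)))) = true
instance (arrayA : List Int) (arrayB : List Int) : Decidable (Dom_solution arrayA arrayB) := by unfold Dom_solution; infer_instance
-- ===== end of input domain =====

-- B rewrites the recursive Euclidean gcd as an iterative while-loop and collapses the three-function
-- pipeline into one symmetric pass over the two (source, target) directions with an inline gcd fold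
-- and all()-style divisibility tests (objective: simpler; same cost).


-- ===== PORT A =====
-- A's recursive gcd.  The '= 0' guards only make the recursion total: there Python raises
-- ZeroDivisionError.  The '< 0' guards sit exactly where Python's recursion never returns
-- (RecursionError); both regions are outside Pre_.
def gcdA (n m : Int) : Int :=
  if n < m then
    -- the Python rebinds n, m = m, n; this branch is the body after that swap
    if n = 0 then 0
    else if PySem.Int.mod m n = 0 then n
    else if n < 0 then 0
    else gcdA n (PySem.Int.mod m n)
  else
    if m = 0 then 0
    else if PySem.Int.mod n m = 0 then m
    else if m < 0 then 0
    else gcdA m (PySem.Int.mod n m)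
termination_by (min n m).toNat
decreasing_by
  · have h1 : 0 ≤ PySem.Int.mod m n := PySem.Int.mod_nonneg _ (by omega)
    have h2 : PySem.Int.mod m n < n := PySem.Int.mod_lt _ (by omega)
    omega
  · have h1 : 0 ≤ PySem.Int.mod n m := PySem.Int.mod_nonneg _ (by omega)
    have h2 : PySem.Int.mod n m < m := PySem.Int.mod_lt _ (by omega)
    omega

-- sol: gcd of a list (IndexError on [] is excluded by Pre_; getD 0 is a totality default)
def solA (lst : List Int) : Int :=
  if lst.length = 1 then (PySem.List.pyGet? lst 0).getD 0
  else
    let value := gcdA ((PySem.List.pyGet? lst 0).getD 0) ((PySem.List.pyGet? lst 1).getD 0)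
    if 2 < lst.length then
      (PySem.List.slice lst (some 2) none).foldl (fun value num => gcdA num value) value
    else value

def solution (arrayA : List Int) (arrayB : List Int) : Int :=
  let answer : Int := 0
  let a := solA arrayA
  let b := solA arrayB
  -- for-else with a lone break = the else branch runs iff no element triggers the break
  let answer := if arrayB.all (fun x => !(PySem.Int.mod x a == 0)) then max answer a else answer
  let answer := if arrayA.all (fun y => !(PySem.Int.mod y b == 0)) then max answer b else answer
  answer

-- ===== PORT B =====
-- B's while-loop gcd; the 'm = 0' guard only makes the loop total (Python raises
-- ZeroDivisionError there, outside Pre_).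
def gcdIterLoop (n m : Int) : Int :=
  if m = 0 then 0
  else if PySem.Int.mod n m = 0 then m
  else gcdIterLoop m (PySem.Int.mod n m)
termination_by m.natAbs
decreasing_by
  rcases lt_trichotomy m 0 with h | h | h
  · have h1 := PySem.Int.mod_neg_bounds n h
    omega
  · omega
  · have h1 : 0 ≤ PySem.Int.mod n m := PySem.Int.mod_nonneg _ h
    have h2 : PySem.Int.mod n m < m := PySem.Int.mod_lt _ h
    omega

def gcdIter (n m : Int) : Int :=
  if n < m then gcdIterLoop m n else gcdIterLoop n m

-- the inner 'd = xs[0]; for v in xs[1:]: d = gcd_iter(v, d)' of Source B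
def gcdFoldB (xs : List Int) : Int :=
  (PySem.List.slice xs (some 1) none).foldl (fun d v => gcdIter v d)
    ((PySem.List.pyGet? xs 0).getD 0)

def solution_alt (arrayA : List Int) (arrayB : List Int) : Int :=
  [(arrayA, arrayB), (arrayB, arrayA)].foldl
    (fun answer p =>
      let d := gcdFoldB p.1
      if p.2.all (fun y => !(PySem.Int.mod y d == 0)) && decide (answer < d) then d else answer)
    0

-- ===== PRECONDITION & SPEC =====
-- Pre_ admits the domain on which A terminates: per array, either all elements positive, or all
-- negative elements equal to one n that divides every element, with no zero before n except a
-- single leading zero.  Outside it A raises IndexError ([]), ZeroDivisionError (zero divisor) or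
-- RecursionError (the sign-ignoring recursion never returns).
def Pre_solution (arrayA : List Int) (arrayB : List Int) : Prop :=
  (arrayA ≠ [] ∧
    ((∀ x ∈ arrayA, 0 < x) ∨
      (arrayA.countP (fun z => decide (z < 0)) ≠ 0 ∧
       (∀ x ∈ arrayA, x < 0 → (∀ y ∈ arrayA, x ∣ y) ∧ (∀ y ∈ arrayA, y < 0 → y = x)) ∧
       ((∀ x ∈ arrayA.takeWhile (fun z => decide (0 ≤ z)), 0 < x) ∨
        arrayA.takeWhile (fun z => decide (0 ≤ z)) = [0])))) ∧
  (arrayB ≠ [] ∧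
    ((∀ x ∈ arrayB, 0 < x) ∨
      (arrayB.countP (fun z => decide (z < 0)) ≠ 0 ∧
       (∀ x ∈ arrayB, x < 0 → (∀ y ∈ arrayB, x ∣ y) ∧ (∀ y ∈ arrayB, y < 0 → y = x)) ∧
       ((∀ x ∈ arrayB.takeWhile (fun z => decide (0 ≤ z)), 0 < x) ∨
        arrayB.takeWhile (fun z => decide (0 ≤ z)) = [0]))))
instance (arrayA : List Int) (arrayB : List Int) : Decidable (Pre_solution arrayA arrayB) := by
  unfold Pre_solution; infer_instance

def pvWitness_solution : List Int × List Int := ([12, 18], [6, 3])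

def Spec_solution (arrayA : List Int) (arrayB : List Int) (out : Int) : Prop := out = solution_alt arrayA arrayB
instance (arrayA : List Int) (arrayB : List Int) (out : Int) : Decidable (Spec_solution arrayA arrayB out) := by unfold Spec_solution; infer_instance

-- ===== CLAIM (what is proved, stated in full; the proofs are below) =====
def Claim_equal_solution : Prop := ∀ (arrayA : List Int) (arrayB : List Int), Dom_solution arrayA arrayB → Pre_solution arrayA arrayB → Spec_solution arrayA arrayB (solution arrayA arrayB)

-- ===== LEMMAS AND PROOFS =====

-- once the arguments are ordered (¬ n < m) and positive, A's recursion is B's loop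
lemma gcdA_eq_loop : ∀ (k : Nat) (n m : Int), m.toNat ≤ k → 0 < m → ¬ n < m →
    gcdA n m = gcdIterLoop n m := by
  intro k
  induction k with
  | zero => intro n m hk hm hnm; omega
  | succ k ih =>
    intro n m hk hm hnm
    have hm0 : ¬ m = 0 := by omega
    have hmneg : ¬ m < 0 := by omega
    rw [gcdA, gcdIterLoop]
    rw [if_neg hnm, if_neg hm0, if_neg hm0]
    by_cases h : PySem.Int.mod n m = 0
    · rw [if_pos h, if_pos h]
    · rw [if_neg h, if_neg h, if_neg hmneg]
      have h1 : 0 ≤ PySem.Int.mod n m := PySem.Int.mod_nonneg _ hm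
      have h2 : PySem.Int.mod n m < m := PySem.Int.mod_lt _ hm
      exact ih m (PySem.Int.mod n m) (by omega) (by omega) (by omega)

lemma gcdA_eq_gcdIter (n m : Int) (hn : 0 < n) (hm : 0 < m) : gcdA n m = gcdIter n m := by
  rw [gcdIter]
  by_cases h : n < m
  · have hn0 : ¬ n = 0 := by omega
    have hnneg : ¬ n < 0 := by omega
    rw [if_pos h, gcdA, if_pos h, gcdIterLoop, if_neg hn0, if_neg hn0]
    by_cases h0 : PySem.Int.mod m n = 0
    · rw [if_pos h0, if_pos h0]
    · rw [if_neg h0, if_neg h0, if_neg hnneg]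
      have h1 : 0 ≤ PySem.Int.mod m n := PySem.Int.mod_nonneg _ hn
      have h2 : PySem.Int.mod m n < n := PySem.Int.mod_lt _ hn
      exact gcdA_eq_loop (PySem.Int.mod m n).toNat n _ (by omega) (by omega) (by omega)
  · rw [if_neg h]
    exact gcdA_eq_loop m.toNat n m (le_refl _) hm h

lemma gcdIterLoop_pos : ∀ (k : Nat) (n m : Int), m.toNat ≤ k → 0 < m →
    0 < gcdIterLoop n m := by
  intro k
  induction k with
  | zero => intro n m hk hm; omega
  | succ k ih =>
    intro n m hk hm
    rw [gcdIterLoop, if_neg (by omega : ¬ m = 0)]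
    by_cases h : PySem.Int.mod n m = 0
    · simpa [h] using hm
    · rw [if_neg h]
      have h1 : 0 ≤ PySem.Int.mod n m := PySem.Int.mod_nonneg _ hm
      have h2 : PySem.Int.mod n m < m := PySem.Int.mod_lt _ hm
      exact ih m (PySem.Int.mod n m) (by omega) (by omega)

lemma gcdIter_pos (n m : Int) (hn : 0 < n) (hm : 0 < m) : 0 < gcdIter n m := by
  rw [gcdIter]
  by_cases h : n < m
  · rw [if_pos h]; exact gcdIterLoop_pos n.toNat m n (le_refl _) hn
  · rw [if_neg h]; exact gcdIterLoop_pos m.toNat n m (le_refl _) hm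

lemma gcdIter_comm (n m : Int) : gcdIter n m = gcdIter m n := by
  rw [gcdIter, gcdIter]
  rcases lt_trichotomy n m with h | h | h
  · rw [if_pos h, if_neg (by omega : ¬ m < n)]
  · subst h; rfl
  · rw [if_neg (by omega : ¬ n < m), if_pos h]

-- a common divisor of the two arguments divides the loop's result
lemma dvd_gcdIterLoop : ∀ (k : Nat) (n m c : Int), m.natAbs ≤ k → m ≠ 0 →
    c ∣ n → c ∣ m → c ∣ gcdIterLoop n m := by
  intro k
  induction k with
  | zero => intro n m c hk hm _ _; omega
  | succ k ih =>
    intro n m c hk hm hcn hcm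
    rw [gcdIterLoop, if_neg hm]
    by_cases h : PySem.Int.mod n m = 0
    · rw [if_pos h]; exact hcm
    · rw [if_neg h]
      have hmod : PySem.Int.mod n m = n - PySem.Int.floordiv n m * m := by
        have := PySem.Int.floordiv_mul_add_mod n m
        omega
      have hcr : c ∣ PySem.Int.mod n m := by
        rw [hmod]
        exact dvd_sub hcn (Dvd.dvd.mul_left hcm _)
      have hbnd : (PySem.Int.mod n m).natAbs < m.natAbs := by
        rcases lt_trichotomy m 0 with hs | hs | hs
        · have := PySem.Int.mod_neg_bounds n hs
          omega
        · omega
        · have h1 : 0 ≤ PySem.Int.mod n m := PySem.Int.mod_nonneg _ hs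
          have h2 : PySem.Int.mod n m < m := PySem.Int.mod_lt _ hs
          omega
      exact ih m (PySem.Int.mod n m) c (by omega) h hcm hcr

lemma dvd_gcdIter (n m c : Int) (hn : 0 < n) (hm : 0 < m) (hcn : c ∣ n) (hcm : c ∣ m) :
    c ∣ gcdIter n m := by
  rw [gcdIter]
  by_cases h : n < m
  · rw [if_pos h]; exact dvd_gcdIterLoop n.natAbs m n c (le_refl _) (by omega) hcm hcn
  · rw [if_neg h]; exact dvd_gcdIterLoop m.natAbs n m c (le_refl _) (by omega) hcn hcm

-- when the smaller argument is negative and divides the larger, both gcds return it at once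
lemma gcd_min_neg (a b : Int) (hn : min a b < 0) (hd : min a b ∣ max a b) :
    gcdA a b = min a b ∧ gcdIter a b = min a b := by
  rcases lt_trichotomy a b with h | h | h
  · have ha : a < 0 := by rwa [min_eq_left h.le] at hn
    have had : a ∣ b := by rwa [min_eq_left h.le, max_eq_right h.le] at hd
    have hmod : PySem.Int.mod b a = 0 := (PySem.Int.mod_eq_zero_iff_dvd b a).mpr had
    rw [min_eq_left h.le]
    constructor
    · rw [gcdA, if_pos h, if_neg (by omega : ¬ a = 0), if_pos hmod]
    · rw [gcdIter, if_pos h, gcdIterLoop, if_neg (by omega : ¬ a = 0), if_pos hmod]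
  · subst h
    have ha : a < 0 := by simpa using hn
    have hmod : PySem.Int.mod a a = 0 := (PySem.Int.mod_eq_zero_iff_dvd a a).mpr dvd_rfl
    rw [min_self]
    constructor
    · rw [gcdA, if_neg (lt_irrefl a), if_neg (by omega : ¬ a = 0), if_pos hmod]
    · rw [gcdIter, if_neg (lt_irrefl a), gcdIterLoop, if_neg (by omega : ¬ a = 0), if_pos hmod]
  · have hb : b < 0 := by rwa [min_eq_right h.le] at hn
    have hbd : b ∣ a := by rwa [min_eq_right h.le, max_eq_left h.le] at hd
    have hmod : PySem.Int.mod a b = 0 := (PySem.Int.mod_eq_zero_iff_dvd a b).mpr hbd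
    rw [min_eq_right h.le]
    constructor
    · rw [gcdA, if_neg (by omega : ¬ a < b), if_neg (by omega : ¬ b = 0), if_pos hmod]
    · rw [gcdIter, if_neg (by omega : ¬ a < b), gcdIterLoop, if_neg (by omega : ¬ b = 0),
        if_pos hmod]

-- the tail folds of A (gcdA num value) and B (gcdIter v d) agree and stay positive
lemma fold_eq : ∀ (rest : List Int) (v : Int), 0 < v → (∀ x ∈ rest, 0 < x) →
    rest.foldl (fun value num => gcdA num value) v
      = rest.foldl (fun d w => gcdIter w d) v
    ∧ 0 < rest.foldl (fun d w => gcdIter w d) v := by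
  intro rest
  induction rest with
  | nil => intro v hv _; exact ⟨rfl, hv⟩
  | cons x xs ih =>
    intro v hv hpos
    have hx : 0 < x := hpos x (by simp)
    have hstep : gcdA x v = gcdIter x v := gcdA_eq_gcdIter x v hx hv
    have hp : 0 < gcdIter x v := gcdIter_pos x v hx hv
    have := ih (gcdIter x v) hp (fun y hy => hpos y (by simp [hy]))
    simpa [List.foldl, hstep] using this

-- once the accumulator is the negative n, it absorbs every remaining element
lemma fold_neg2 (n : Int) (hn : n < 0) : ∀ (zs : List Int), (∀ x ∈ zs, n ≤ x ∧ n ∣ x) →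
    zs.foldl (fun value num => gcdA num value) n = n ∧
    zs.foldl (fun d w => gcdIter w d) n = n := by
  intro zs
  induction zs with
  | nil => intro _; exact ⟨rfl, rfl⟩
  | cons v zs ih =>
    intro h
    obtain ⟨hv0, hvd⟩ := h v (by simp)
    have hmin : min v n = n := min_eq_right hv0
    have hstep := gcd_min_neg v n (by omega) (by rw [hmin, max_eq_left hv0]; exact hvd)
    rw [hmin] at hstep
    have := ih (fun x hx => h x (by simp [hx]))
    constructor
    · rw [List.foldl_cons, hstep.1]; exact this.1
    · rw [List.foldl_cons, hstep.2]; exact this.2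

-- positive prefix, then the negative n, then nonnegative multiples: both folds end at n
lemma fold_neg1 (n : Int) (hn : n < 0) :
    ∀ (ys : List Int) (d : Int), 0 < d → n ∣ d → (∀ x ∈ ys, 0 < x ∧ n ∣ x) →
      ∀ (zs : List Int), (∀ x ∈ zs, n ≤ x ∧ n ∣ x) →
      (ys ++ n :: zs).foldl (fun value num => gcdA num value) d = n ∧
      (ys ++ n :: zs).foldl (fun d w => gcdIter w d) d = n := by
  intro ys
  induction ys with
  | nil =>
    intro d hd hnd _ zs hzs
    have hmin : min n d = n := min_eq_left (by omega)
    have hstep := gcd_min_neg n d (by omega) (by rw [hmin, max_eq_right (by omega : n ≤ d)]; exact hnd)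
    rw [hmin] at hstep
    have := fold_neg2 n hn zs hzs
    constructor
    · rw [List.nil_append, List.foldl_cons, hstep.1]; exact this.1
    · rw [List.nil_append, List.foldl_cons, hstep.2]; exact this.2
  | cons y ys ih =>
    intro d hd hnd hys zs hzs
    obtain ⟨hy0, hyd⟩ := hys y (by simp)
    have hstep : gcdA y d = gcdIter y d := gcdA_eq_gcdIter y d hy0 hd
    have hp : 0 < gcdIter y d := gcdIter_pos y d hy0 hd
    have hdvd : n ∣ gcdIter y d := dvd_gcdIter y d n hy0 hd hyd hnd
    have := ih (gcdIter y d) hp hdvd (fun x hx => hys x (by simp [hx])) zs hzs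
    constructor
    · rw [List.cons_append, List.foldl_cons, hstep]; exact this.1
    · rw [List.cons_append, List.foldl_cons]; exact this.2

-- shape lemmas: both pipelines reduce to a fold over the tail
lemma solA_cons2 (x y : Int) (rest : List Int) :
    solA (x :: y :: rest) = rest.foldl (fun value num => gcdA num value) (gcdA x y) := by
  have hget0 : (PySem.List.pyGet? (x :: y :: rest) 0).getD 0 = x := by
    simp [PySem.List.pyGet?_zero_cons]
  have hget1 : (PySem.List.pyGet? (x :: y :: rest) 1).getD 0 = y := by
    have h1 : PySem.List.pyGet? (x :: y :: rest) ((1:Nat) : Int) = (x :: y :: rest)[(1:Nat)]? :=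
      PySem.List.pyGet?_natCast _ _
    simp only [Nat.cast_one] at h1
    rw [h1]
    rfl
  have hslice2 : PySem.List.slice (x :: y :: rest) (some 2) none = rest := by
    have := PySem.List.slice_from_natCast (x :: y :: rest) 2
    simpa using this
  by_cases hlen : 2 < (x :: y :: rest).length
  · rw [solA, if_neg (by simp), if_pos hlen, hslice2, hget0, hget1]
  · have hr : rest = [] := by
      by_contra hcon
      cases rest with
      | nil => exact hcon rfl
      | cons a as => simp at hlen
    subst hr
    rw [solA, if_neg (by simp), if_neg (by simp), hget0, hget1]
    rfl

lemma gcdFoldB_cons2 (x y : Int) (rest : List Int) :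
    gcdFoldB (x :: y :: rest) = rest.foldl (fun d w => gcdIter w d) (gcdIter y x) := by
  rw [gcdFoldB, PySem.List.slice_from_one]
  simp [PySem.List.pyGet?_zero_cons]

-- A's sol equals B's inline gcd fold on every admitted list
lemma solA_eq_gcdFoldB (lst : List Int)
    (h : lst ≠ [] ∧
      ((∀ x ∈ lst, 0 < x) ∨
        (lst.countP (fun z => decide (z < 0)) ≠ 0 ∧
         (∀ x ∈ lst, x < 0 → (∀ y ∈ lst, x ∣ y) ∧ (∀ y ∈ lst, y < 0 → y = x)) ∧
         ((∀ x ∈ lst.takeWhile (fun z => decide (0 ≤ z)), 0 < x) ∨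
          lst.takeWhile (fun z => decide (0 ≤ z)) = [0])))) :
    solA lst = gcdFoldB lst := by
  match lst, h.1 with
  | [x], _ => simp [solA, gcdFoldB, PySem.List.slice_from_one]
  | x :: y :: rest, _ =>
    rw [solA_cons2, gcdFoldB_cons2]
    rcases h.2 with hpos | ⟨hcount, hdvd, htake⟩
    · -- all positive
      have hx : 0 < x := hpos x (by simp)
      have hy : 0 < y := hpos y (by simp)
      have h01 : gcdA x y = gcdIter y x := by
        rw [gcdA_eq_gcdIter x y hx hy, gcdIter_comm]
      have hrest : ∀ z ∈ rest, 0 < z := fun z hz => hpos z (by simp [hz])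
      have := fold_eq rest (gcdIter y x) (gcdIter_pos y x hy hx) hrest
      rw [h01]
      exact this.1
    · -- all negatives equal one n dividing everything; no zero before n but a single leading one
      set l := x :: y :: rest with hl
      set p : Int → Bool := fun z => decide (0 ≤ z) with hp
      have hsplit : l.takeWhile p ++ l.dropWhile p = l := List.takeWhile_append_dropWhile
      have hdrop_ne : l.dropWhile p ≠ [] := by
        intro hnil
        have : l.countP (fun z => decide (z < 0)) = 0 := by
          refine List.countP_eq_zero.mpr ?_
          intro z hz
          have hzt : z ∈ l.takeWhile p := by
            rw [← hsplit, hnil, List.append_nil] at hz; exact hz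
          have := List.mem_takeWhile_imp hzt
          simp [hp] at this
          simpa using (by omega : ¬ z < 0)
        exact hcount this
      obtain ⟨n, zs, hdw⟩ : ∃ n zs, l.dropWhile p = n :: zs := by
        cases hdw : l.dropWhile p with
        | nil => exact absurd hdw hdrop_ne
        | cons n zs => exact ⟨n, zs, rfl⟩
      have hnneg : n < 0 := by
        have hfail := List.head_dropWhile_not p hdrop_ne
        have h1 : (l.dropWhile p).head? = some n := by rw [hdw]; rfl
        have h2 : (l.dropWhile p).head? = some ((l.dropWhile p).head hdrop_ne) :=
          List.head?_eq_some_head _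
        have h3 : (l.dropWhile p).head hdrop_ne = n := by
          rw [h1] at h2; injection h2 with h3; exact h3.symm
        rw [h3] at hfail
        simp [hp] at hfail
        omega
      have hdecomp : l = l.takeWhile p ++ n :: zs := by
        rw [← hdw]; exact hsplit.symm
      have hnmem : n ∈ l := by rw [hdecomp]; simp
      have hndvd : ∀ z ∈ l, n ∣ z := (hdvd n hnmem hnneg).1
      have hnuniq : ∀ z ∈ l, z < 0 → z = n := (hdvd n hnmem hnneg).2
      have hzs : ∀ z ∈ zs, n ≤ z ∧ n ∣ z := by
        intro z hz
        have hzl : z ∈ l := by rw [hdecomp]; simp [hz]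
        refine ⟨?_, hndvd z hzl⟩
        rcases (by omega : 0 ≤ z ∨ z < 0) with h0 | h0
        · omega
        · have := hnuniq z hzl h0; omega
      have htw_le : ∀ z ∈ l.takeWhile p, 0 ≤ z := by
        intro z hz
        have := List.mem_takeWhile_imp hz
        simpa [hp] using this
      -- case on where n sits among the first two elements
      cases htw : l.takeWhile p with
      | nil =>
        -- x = n, y :: rest = zs
        have hx : x = n ∧ y :: rest = zs := by
          have h2 := hdecomp
          rw [htw, List.nil_append, hl] at h2
          simp only [List.cons.injEq] at h2
          exact ⟨h2.1, h2.2.symm ▸ rfl⟩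
        obtain ⟨rfl, hyr⟩ := hx
        have hy' : x ≤ y ∧ x ∣ y := hzs y (by rw [← hyr]; simp)
        have hstepA := gcd_min_neg x y (by rw [min_eq_left hy'.1]; omega)
          (by rw [min_eq_left hy'.1, max_eq_right hy'.1]; exact hy'.2)
        have hstepB := gcd_min_neg y x (by rw [min_eq_right hy'.1]; omega)
          (by rw [min_eq_right hy'.1, max_eq_left hy'.1]; exact hy'.2)
        rw [min_eq_left hy'.1] at hstepA
        rw [min_eq_right hy'.1] at hstepB
        have hrest : ∀ z ∈ rest, x ≤ z ∧ x ∣ z := fun z hz => hzs z (by rw [← hyr]; simp [hz])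
        have := fold_neg2 x (by omega) rest hrest
        rw [hstepA.1, hstepB.2]
        rw [this.1, this.2]
      | cons w ws =>
        have hw : w = x ∧ ws ++ n :: zs = y :: rest := by
          have h2 := hdecomp
          rw [htw, hl] at h2
          simp only [List.cons_append, List.cons.injEq] at h2
          exact ⟨h2.1.symm, h2.2.symm⟩
        obtain ⟨rfl, hws⟩ := hw
        have hwmem : w ∈ l.takeWhile p := by rw [htw]; simp
        have hx : 0 ≤ w ∧ n ∣ w :=
          ⟨htw_le w hwmem, hndvd w (by rw [hdecomp]; exact List.mem_append_left _ hwmem)⟩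
        cases hws2 : ws with
        | nil =>
          -- y = n, rest = zs
          have hyn : y = n ∧ rest = zs := by
            have h2 := hws
            rw [hws2, List.nil_append] at h2
            simp only [List.cons.injEq] at h2
            exact ⟨h2.1.symm, h2.2.symm⟩
          obtain ⟨rfl, rfl⟩ := hyn
          have hstepA := gcd_min_neg w y (by rw [min_eq_right (by omega : y ≤ w)]; omega)
            (by rw [min_eq_right (by omega : y ≤ w), max_eq_left (by omega : y ≤ w)]; exact hx.2)
          have hstepB := gcd_min_neg y w (by rw [min_eq_left (by omega : y ≤ w)]; omega)
            (by rw [min_eq_left (by omega : y ≤ w), max_eq_right (by omega : y ≤ w)]; exact hx.2)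
          rw [min_eq_right (by omega : y ≤ w)] at hstepA
          rw [min_eq_left (by omega : y ≤ w)] at hstepB
          have := fold_neg2 y (by omega) rest
            (by intro z hz; exact hzs z hz)
          rw [hstepA.1, hstepB.2, this.1, this.2]
        | cons u us =>
          -- w and u positive (the takeWhile is not [0]); rest = us ++ n :: zs
          have htpos : ∀ z ∈ l.takeWhile p, 0 < z := by
            rcases htake with hpos' | h0
            · exact hpos'
            · rw [htw, hws2] at h0; simp at h0
          have hyu : u = y ∧ us ++ n :: zs = rest := by
            have h2 := hws
            rw [hws2, List.cons_append] at h2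
            simp only [List.cons.injEq] at h2
            exact ⟨h2.1, h2.2⟩
          obtain ⟨rfl, hrest⟩ := hyu
          have hw1 : 0 < w := htpos w hwmem
          have hy : 0 < u ∧ n ∣ u := by
            have hum : u ∈ l.takeWhile p := by rw [htw, hws2]; simp
            exact ⟨htpos u hum,
              hndvd u (by rw [hdecomp]; exact List.mem_append_left _ hum)⟩
          have h01 : gcdA w u = gcdIter u w := by
            rw [gcdA_eq_gcdIter w u hw1 hy.1, gcdIter_comm]
          have hp0 : 0 < gcdIter u w := gcdIter_pos u w hy.1 hw1
          have hd0 : n ∣ gcdIter u w := dvd_gcdIter u w n hy.1 hw1 hy.2 hx.2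
          have hus : ∀ z ∈ us, 0 < z ∧ n ∣ z := by
            intro z hz
            have hzm : z ∈ l.takeWhile p := by rw [htw, hws2]; simp [hz]
            exact ⟨htpos z hzm,
              hndvd z (by rw [hdecomp]; exact List.mem_append_left _ hzm)⟩
          have := fold_neg1 n hnneg us (gcdIter u w) hp0 hd0 hus zs hzs
          rw [h01, ← hrest, this.1, this.2]

-- ===== VERDICT (by name: the statement is the Claim_ definition above) =====
theorem solution_spec : Claim_equal_solution := by
  intro arrayA arrayB _ hpre
  obtain ⟨hA, hB⟩ := hpre
  have haeq := solA_eq_gcdFoldB arrayA hA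
  have hbeq := solA_eq_gcdFoldB arrayB hB
  unfold Spec_solution solution solution_alt
  rw [haeq, hbeq]
  simp only [List.foldl]
  rcases Bool.eq_false_or_eq_true
      (arrayB.all (fun x => !(PySem.Int.mod x (gcdFoldB arrayA) == 0))) with hc1 | hc1 <;>
    rcases Bool.eq_false_or_eq_true
        (arrayA.all (fun y => !(PySem.Int.mod y (gcdFoldB arrayB) == 0))) with hc2 | hc2 <;>
      simp only [hc1, hc2] <;> simp <;> (try split_ifs) <;> omega
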